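-- pv_equiv track=rewrite | github.com/kanitsch/ASD | ubiegle_lata/zadania_offline_szablony (1)/zadania offline szablony/offline2/zad2.py | counting_more
-- ===== SOURCE A (Python) =====
-- def counting_more(A):
--     n=len(A)
--     C={}
--     for x,e in A:
--         if e in C:
--             C[e]+=1
--         else:
--             C[e]=1
--     C_sorted=sorted(C.items())
--     for i in range(len(C_sorted)):
--         C_sorted[i]=[C_sorted[i][0],C_sorted[i][1]]
--     C[C_sorted[-1][0]]=0
--     for i in range(len(C_sorted)-2,-1,-1):
--         C[C_sorted[i][0]]*=-1
--         C_sorted[i][1]+=C_sorted[i+1][1]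
--         C[C_sorted[i][0]]+=C_sorted[i][1]
--     return C
-- ===== SOURCE B (Python) =====
-- def _bisect_right(S, x):
--     # rightmost insertion point of x in sorted list S (hand-written: the module imports nothing)
--     lo, hi = 0, len(S)
--     while lo < hi:
--         mid = (lo + hi) // 2
--         if S[mid] <= x:
--             lo = mid + 1
--         else:
--             hi = mid
--     return lo
--
-- def counting_more(A):
--     S = sorted(e for _, e in A)
--     n = len(S)
--     res = {}
--     for _, e in A:
--         if e not in res:
--             res[e] = n - _bisect_right(S, e)
--     return res
-- ===== Notes on version B (the rewrite author's own statement) =====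
-- stated objective: alternative
-- what changed: replaces the Counter dict plus descending suffix-sum accumulation loop by one full sort of all keys and a per-distinct-key binary search (n - bisect_right), writing each result directly at the key's first occurrence
import Mathlib
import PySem

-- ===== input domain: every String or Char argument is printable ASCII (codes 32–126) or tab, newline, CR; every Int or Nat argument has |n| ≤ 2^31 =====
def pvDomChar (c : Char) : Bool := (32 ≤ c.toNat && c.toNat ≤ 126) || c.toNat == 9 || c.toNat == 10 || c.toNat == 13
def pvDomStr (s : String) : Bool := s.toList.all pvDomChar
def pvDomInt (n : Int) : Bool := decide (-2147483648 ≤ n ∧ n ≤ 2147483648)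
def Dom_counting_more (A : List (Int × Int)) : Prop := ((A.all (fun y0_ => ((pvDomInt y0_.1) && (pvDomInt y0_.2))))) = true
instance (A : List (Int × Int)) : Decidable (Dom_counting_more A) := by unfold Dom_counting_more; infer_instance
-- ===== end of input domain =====

-- B replaces A's Counter + descending suffix-sum loop by one full sort of all keys plus a
-- per-distinct-key hand-written binary search (n - bisect_right); alternative, not claimed faster.

-- ===== PORT A =====
-- list item assignment `xs[i] = v`; exact for the indices Python accepts (the loop indices are
-- always in range here; on an out-of-range index Python would raise — never reached).
def pySet {α : Type} (xs : List α) (i : Int) (v : α) : List α :=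
  match PySem.List.pyIdx? xs.length i with
  | some n => xs.set n v
  | none => xs

-- the body of A's descending for-loop (reads and writes C_sorted and C exactly as the Python does)
def aStep (st : List (Int × Int) × PySem.Dict Int Int) (i : Int) :
    List (Int × Int) × PySem.Dict Int Int :=
  let cs := st.1
  let C := st.2
  let C := C.insert (PySem.List.pyGetD cs i (0, 0)).1
      (C.getD (PySem.List.pyGetD cs i (0, 0)).1 0 * -1)
  let cs := pySet cs i
      ((PySem.List.pyGetD cs i (0, 0)).1,
       (PySem.List.pyGetD cs i (0, 0)).2 + (PySem.List.pyGetD cs (i + 1) (0, 0)).2)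
  let C := C.insert (PySem.List.pyGetD cs i (0, 0)).1
      (C.getD (PySem.List.pyGetD cs i (0, 0)).1 0 + (PySem.List.pyGetD cs i (0, 0)).2)
  (cs, C)

def counting_more (A : List (Int × Int)) : List (Int × Int) :=
  let C : PySem.Dict Int Int :=
    A.foldl (fun C p =>
      if C.contains p.2 then C.insert p.2 (C.getD p.2 0 + 1) else C.insert p.2 1)
      PySem.Dict.empty
  let Cs : List (Int × Int) := PySem.List.sorted2 C.items Prod.fst Prod.snd
  -- (the Python loop re-wrapping each pair (k, v) as the list [k, v] only makes the entries
  -- mutable; on the ported pairs it is the identity)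
  match PySem.List.pyGet? Cs (-1) with
  | none => []  -- Python raises IndexError here (only when A = []); excluded by Pre_
  | some last =>
    let C := C.insert last.1 0
    let st := (PySem.List.pyRange (PySem.List.len Cs - 2) (-1) (-1)).foldl aStep (Cs, C)
    st.2.items

-- ===== PORT B =====
-- hand-written bisect_right from Source B (Source B may not import bisect), ported step for step;
-- S[mid] via pyGetD: the loop keeps 0 ≤ lo ≤ mid < hi ≤ len S, so the index is always in range.
def pyBisectRight (S : List Int) (x : Int) (lo hi : Int) : Int :=
  if h : lo < hi then
    let mid := PySem.Int.floordiv (lo + hi) 2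
    if PySem.List.pyGetD S mid 0 ≤ x then pyBisectRight S x (mid + 1) hi
    else pyBisectRight S x lo mid
  else lo
termination_by (hi - lo).toNat
decreasing_by
  · have h1 := PySem.Int.floordiv_two_mid_bounds (le_of_lt h)
    omega
  · have h2 : PySem.Int.floordiv (lo + hi) 2 < hi :=
      (PySem.Int.floordiv_lt_iff_lt_mul (by norm_num)).2 (by omega)
    have h1 := PySem.Int.floordiv_two_mid_bounds (le_of_lt h)
    omega

def counting_more_alt (A : List (Int × Int)) : List (Int × Int) :=
  let S := PySem.List.sorted (A.map Prod.snd) (fun e => e)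
  let n : Int := PySem.List.len S
  let res : PySem.Dict Int Int :=
    A.foldl (fun res p =>
      if res.contains p.2 then res
      else res.insert p.2 (n - pyBisectRight S p.2 0 (PySem.List.len S)))
      PySem.Dict.empty
  res.items

-- ===== PRECONDITION & SPEC =====
-- Pre_ excludes only the empty list, on which A raises IndexError (C_sorted[-1]).
def Pre_counting_more (A : List (Int × Int)) : Prop := A ≠ []
instance (A : List (Int × Int)) : Decidable (Pre_counting_more A) := by
  unfold Pre_counting_more; infer_instance
def pvWitness_counting_more : (List (Int × Int)) := [(0, 1), (5, 2), (0, 1)]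

def Spec_counting_more (A : List (Int × Int)) (out : List (Int × Int)) : Prop :=
  out = counting_more_alt A
instance (A : List (Int × Int)) (out : List (Int × Int)) : Decidable (Spec_counting_more A out) := by
  unfold Spec_counting_more; infer_instance

-- ===== CLAIM (what is proved, stated in full; the proofs are below) =====
def Claim_equal_counting_more : Prop := ∀ (A : List (Int × Int)), Dom_counting_more A →
  Pre_counting_more A → Spec_counting_more A (counting_more A)
-- ===== LEMMAS AND PROOFS =====
def keyCnt (xs : List Int) (k : Int) : Int := (xs.count k : Int)
def gtCnt (xs : List Int) (k : Int) : Int := (xs.countP (fun e => decide (k < e)) : Int)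
def geCnt (xs : List Int) (k : Int) : Int := (xs.countP (fun e => decide (k ≤ e)) : Int)

theorem geCnt_split (xs : List Int) (k : Int) : geCnt xs k = keyCnt xs k + gtCnt xs k := by
  induction xs with
  | nil => simp [geCnt, keyCnt, gtCnt]
  | cons a t ih =>
    simp only [geCnt, keyCnt, gtCnt, List.countP_cons, List.count_cons] at *
    rcases lt_trichotomy k a with h | h | h
    · simp [le_of_lt h, h, ne_of_gt h]; push_cast at *; omega
    · subst h; simp; push_cast at *; omega
    · simp [not_le_of_gt h, not_lt_of_gt h, ne_of_lt h]; push_cast at *; omega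

-- A's counting loop is Counter(A.map snd)
theorem getD_of_not_contains {κ ν : Type} [BEq κ] (d : PySem.Dict κ ν) (k : κ) (d0 : ν)
    (h : d.contains k = false) : d.getD k d0 = d0 := by
  simp only [PySem.Dict.contains, List.any_eq_false] at h
  simp [PySem.Dict.getD, PySem.Dict.get?, List.find?_eq_none.2 (by intro p hp; simpa using h p hp)]

theorem a_count_step (d : PySem.Dict Int Int) (k : Int) :
    (if d.contains k then d.insert k (d.getD k 0 + 1) else d.insert k 1)
      = d.modify k 0 (· + 1) := by
  by_cases h : d.contains k
  · simp [h, PySem.Dict.modify]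
  · simp only [eq_false_of_ne_true h, Bool.false_eq_true, if_false, PySem.Dict.modify,
      getD_of_not_contains d k 0 (eq_false_of_ne_true h)]
    norm_num

theorem a_fold_eq_counter (A : List (Int × Int)) :
    A.foldl (fun C p =>
      if C.contains p.2 then C.insert p.2 (C.getD p.2 0 + 1) else C.insert p.2 1)
      PySem.Dict.empty = PySem.Dict.counter (A.map Prod.snd) := by
  rw [PySem.Dict.counter_eq_foldl, List.foldl_map]
  exact List.foldl_ext _ _ _ (fun d p _ => a_count_step d p.2)

-- dicts whose items are `K.map (fun k => (k, g k))`
theorem contains_mk_map (K : List Int) (g : Int → Int) (k : Int) :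
    (PySem.Dict.mk (K.map (fun k' => (k', g k')))).contains k = K.contains k := by
  simp [PySem.Dict.contains_mk, List.any_map, Function.comp_def, List.any_beq']

theorem getD_mk_map (K : List Int) (g : Int → Int) (k : Int) (hk : k ∈ K) :
    (PySem.Dict.mk (K.map (fun k' => (k', g k')))).getD k 0 = g k := by
  induction K with
  | nil => cases hk
  | cons a t ih =>
    by_cases h : a = k
    · subst h; simp [PySem.Dict.getD, PySem.Dict.get?]
    · have : k ∈ t := by cases hk with | head => exact absurd rfl h | tail _ h' => exact h'
      simpa [PySem.Dict.getD, PySem.Dict.get?, List.find?_cons, h] using ih this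

theorem insert_mk_map (K : List Int) (g : Int → Int) (k : Int) (v : Int) (hk : k ∈ K) :
    (PySem.Dict.mk (K.map (fun k' => (k', g k')))).insert k v
      = PySem.Dict.mk (K.map (fun k' => (k', if k' = k then v else g k'))) := by
  have hc : (PySem.Dict.mk (K.map (fun k' => (k', g k')))).contains k = true := by
    rw [contains_mk_map]; exact List.elem_eq_true_of_mem hk
  simp only [PySem.Dict.insert, hc, if_true, List.map_map]
  congr 1
  apply List.map_congr_left
  intro a _
  by_cases h : a = k <;> simp [h]

-- B's dict-building loop: first-occurrence keys with a fixed value function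
theorem b_fold (f : Int → Int) (xs : List Int) :
    ∀ (K0 : List Int),
    xs.foldl (fun d e => if d.contains e then d else d.insert e (f e))
        (PySem.Dict.mk (K0.map (fun k => (k, f k))))
      = PySem.Dict.mk ((xs.foldl PySem.Set.add K0).map (fun k => (k, f k))) := by
  induction xs with
  | nil => intro K0; rfl
  | cons e t ih =>
    intro K0
    simp only [List.foldl_cons]
    by_cases h : K0.contains e
    · rw [show (PySem.Dict.mk (K0.map (fun k => (k, f k)))).contains e = true from
        (contains_mk_map K0 f e).trans h]
      simp only [if_true, PySem.Set.add, PySem.Set.contains, h, if_true]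
      exact ih K0
    · rw [show (PySem.Dict.mk (K0.map (fun k => (k, f k)))).contains e = false from
        (contains_mk_map K0 f e).trans (eq_false_of_ne_true h)]
      simp only [Bool.false_eq_true, if_false, PySem.Set.add, PySem.Set.contains, h]
      have hins : (PySem.Dict.mk (K0.map (fun k => (k, f k)))).insert e (f e)
          = PySem.Dict.mk ((K0 ++ [e]).map (fun k => (k, f k))) := by
        simp only [PySem.Dict.insert, contains_mk_map K0 f e, eq_false_of_ne_true h,
          Bool.false_eq_true, if_false, List.map_append, List.map_cons, List.map_nil]
      rw [hins]
      exact ih (K0 ++ [e])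

-- sorted2 with pairwise-distinct first keys is sort-by-first-key
theorem insertBy_congr {α : Type} (b₁ b₂ : α → α → Bool) (S : List α)
    (h : ∀ a ∈ S, ∀ c ∈ S, b₁ a c = b₂ a c) (x : α) (hx : x ∈ S) :
    ∀ acc, (∀ y ∈ acc, y ∈ S) →
      PySem.List.insertBy b₁ x acc = PySem.List.insertBy b₂ x acc := by
  intro acc
  induction acc with
  | nil => intro; rfl
  | cons y ys ih =>
    intro hacc
    have hy : y ∈ S := hacc y (by simp)
    simp only [PySem.List.insertBy, h x hx y hy]
    split
    · rfl
    · rw [ih (fun z hz => hacc z (by simp [hz]))]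

theorem foldl_insertBy_congr {α : Type} (b₁ b₂ : α → α → Bool) (S : List α)
    (h : ∀ a ∈ S, ∀ c ∈ S, b₁ a c = b₂ a c) :
    ∀ (ys acc : List α), (∀ y ∈ ys, y ∈ S) → (∀ y ∈ acc, y ∈ S) →
      ys.foldl (fun acc x => PySem.List.insertBy b₁ x acc) acc
        = ys.foldl (fun acc x => PySem.List.insertBy b₂ x acc) acc := by
  intro ys
  induction ys with
  | nil => intros; rfl
  | cons y t ih =>
    intro acc hys hacc
    have hy : y ∈ S := hys y (by simp)
    simp only [List.foldl_cons]
    rw [insertBy_congr b₁ b₂ S h y hy acc hacc]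
    exact ih _ (fun z hz => hys z (by simp [hz]))
      (fun z hz => ((PySem.List.mem_insertBy b₂ y z acc).1 hz).elim
        (fun he => he ▸ hy) (fun hz' => hacc z hz'))

theorem sorted2_eq_sorted_fst (L : List (Int × Int))
    (h : ∀ a ∈ L, ∀ b ∈ L, a.1 = b.1 → a = b) :
    PySem.List.sorted2 L Prod.fst Prod.snd = PySem.List.sorted L Prod.fst := by
  rw [PySem.List.sorted_eq_foldl_insertBy]
  show L.foldl (fun acc x => PySem.List.insertBy _ x acc) [] = _
  apply foldl_insertBy_congr _ _ L _ L [] (fun y hy => hy) (by simp)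
  intro a ha c hc
  by_cases he : a.1 = c.1
  · have : a = c := h a ha c hc he
    subst this
    simp
  · rcases lt_or_gt_of_ne he with hlt | hgt
    · simp [hlt, asymm hlt]
    · simp [hgt, asymm hgt, not_lt_of_gt hgt]

-- strictly increasing lists: getElem comparisons
theorem pairwise_lt_getElem_iff (S : List Int) (h : S.Pairwise (· < ·)) (i j : Nat)
    (hi : i < S.length) (hj : j < S.length) : S[i] < S[j] ↔ i < j := by
  constructor
  · intro hlt
    by_contra hn
    rcases Nat.lt_or_ge j i with hji | hij
    · exact absurd (List.pairwise_iff_getElem.1 h j i hj hi hji) (not_lt_of_gt hlt)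
    · have : i = j := by omega
      subst this
      exact lt_irrefl _ hlt
  · intro hij
    exact List.pairwise_iff_getElem.1 h i j hi hj hij

theorem pairwise_le_getElem (S : List Int) (h : S.Pairwise (· ≤ ·)) (i j : Nat)
    (hij : i ≤ j) (hj : j < S.length) : S[i] ≤ S[j] := by
  rcases Nat.eq_or_lt_of_le hij with he | hlt
  · subst he; exact le_refl _
  · exact List.pairwise_iff_getElem.1 h i j (by omega) hj hlt

-- descending range: cons form and empty base
theorem pyRange_down_nil : PySem.List.pyRange (-1) (-1) (-1) = [] := by decide

theorem pyRange_down_cons (a : Int) (ha : 0 ≤ a) :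
    PySem.List.pyRange a (-1) (-1) = a :: PySem.List.pyRange (a - 1) (-1) (-1) := by
  obtain ⟨n, rfl⟩ := Int.eq_ofNat_of_zero_le ha
  simp only [PySem.List.pyRange]
  norm_num
  rw [if_pos (by exact_mod_cast Int.lt_of_lt_of_le (by norm_num) (Int.natCast_nonneg n) :
        (-1 : Int) < (n : Int)),
      show (if 0 < n then n else 0) = n by split <;> omega]
  rw [List.range_succ_eq_map]
  simp only [List.map_cons, List.map_map, Function.comp_def, Nat.cast_zero, neg_zero, add_zero]
  congr 1
  apply List.map_congr_left
  intro k _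
  push_cast
  ring

-- the hand-written binary search: n - result counts the elements strictly greater than x
theorem countP_gt_of_cut (S : List Int) (x : Int) (lo : Nat) (hlo : lo ≤ S.length)
    (h : ∀ (j : Nat) (hj : j < S.length), x < S[j] ↔ lo ≤ j) :
    S.countP (fun e => decide (x < e)) = S.length - lo := by
  conv_lhs => rw [← List.take_append_drop lo S]
  rw [List.countP_append]
  have h1 : (S.take lo).countP (fun e => decide (x < e)) = 0 := by
    rw [List.countP_eq_zero]
    intro a ha
    obtain ⟨j, hj, rfl⟩ := List.mem_iff_getElem.1 ha
    have hjl : j < lo := by simp [List.length_take] at hj; omega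
    rw [List.getElem_take]
    simp only [decide_eq_true_eq]
    intro hx
    exact absurd ((h j (by omega)).1 hx) (by omega)
  have h2 : (S.drop lo).countP (fun e => decide (x < e)) = (S.drop lo).length := by
    rw [List.countP_eq_length]
    intro a ha
    obtain ⟨j, hj, rfl⟩ := List.mem_iff_getElem.1 ha
    rw [List.getElem_drop]
    simp only [decide_eq_true_eq]
    exact (h (lo + j) (by simp [List.length_drop] at hj; omega)).2 (by omega)
  rw [h1, h2]
  simp [List.length_drop]

theorem bis_loop (S : List Int) (x : Int) (hS : S.Pairwise (· ≤ ·)) :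
    ∀ (fuel : Nat) (lo hi : Int), (hi - lo).toNat = fuel → 0 ≤ lo → hi ≤ (S.length : Int) →
    lo ≤ hi →
    (∀ (j : Nat) (hj : j < S.length), (j : Int) < lo → S[j] ≤ x) →
    (∀ (j : Nat) (hj : j < S.length), hi ≤ (j : Int) → x < S[j]) →
    (S.length : Int) - pyBisectRight S x lo hi = (S.countP (fun e => decide (x < e)) : Int) := by
  intro fuel
  induction fuel using Nat.strong_induction_on with
  | _ fuel ih =>
    intro lo hi hfuel h0 hn hlh hbelow habove
    rw [pyBisectRight]
    by_cases h : lo < hi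
    · rw [dif_pos h]
      have hmid := PySem.Int.floordiv_two_mid_bounds (le_of_lt h)
      have hmlt : PySem.Int.floordiv (lo + hi) 2 < hi :=
        (PySem.Int.floordiv_lt_iff_lt_mul (by norm_num)).2 (by omega)
      set mid := PySem.Int.floordiv (lo + hi) 2 with hmiddef
      have hmrange : 0 ≤ mid ∧ mid < (S.length : Int) := ⟨by omega, by omega⟩
      have hget : PySem.List.pyGetD S mid 0 = S[mid.toNat]'(by omega) :=
        PySem.List.pyGetD_eq_getElem S 0 hmrange.1 (by omega)
      by_cases hc : PySem.List.pyGetD S mid 0 ≤ x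
      · rw [if_pos hc]
        apply ih (hi - (mid + 1)).toNat (by omega) (mid + 1) hi rfl (by omega) hn (by omega)
        · intro j hj hjlt
          have : S[j] ≤ S[mid.toNat]'(by omega) :=
            pairwise_le_getElem S hS j mid.toNat (by omega) (by omega)
          rw [hget] at hc
          omega
        · exact habove
      · rw [if_neg hc]
        push_neg at hc
        rw [hget] at hc
        apply ih (mid - lo).toNat (by omega) lo mid rfl h0 (by omega) (by omega) hbelow
        intro j hj hjge
        have : S[mid.toNat]'(by omega) ≤ S[j] :=
          pairwise_le_getElem S hS mid.toNat j (by omega) hj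
        omega
    · rw [dif_neg h]
      have hle : lo = hi := by omega
      have : S.countP (fun e => decide (x < e)) = S.length - lo.toNat := by
        apply countP_gt_of_cut S x lo.toNat (by omega)
        intro j hj
        constructor
        · intro hx
          by_contra hn2
          have := hbelow j hj (by omega)
          omega
        · intro hjge
          exact habove j hj (by omega)
      rw [this]
      omega

theorem bis_top (S : List Int) (x : Int) (hS : S.Pairwise (· ≤ ·)) :
    (S.length : Int) - pyBisectRight S x 0 (S.length : Int)
      = (S.countP (fun e => decide (x < e)) : Int) := by
  apply bis_loop S x hS (S.length : Int).toNat 0 (S.length : Int) (by omega) (by omega)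
    (by omega) (by omega)
  · intro j hj hjlt; omega
  · intro j hj hjge; omega

-- key-count facts on the strictly increasing list SK of distinct keys
theorem kf_gt_eq_ge (xs SK : List Int) (hpw : SK.Pairwise (· < ·))
    (hmem : ∀ e ∈ xs, e ∈ SK) (i : Nat) (h : i + 1 < SK.length) :
    gtCnt xs (SK[i]'(by omega)) = geCnt xs (SK[i + 1]) := by
  unfold gtCnt geCnt
  congr 1
  apply List.countP_congr
  intro e he
  obtain ⟨j, hj, rfl⟩ := List.mem_iff_getElem.1 (hmem e he)
  simp only [decide_eq_true_eq]
  rw [pairwise_lt_getElem_iff SK hpw i j (by omega) hj]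
  constructor
  · intro hij
    exact pairwise_le_getElem SK (hpw.imp le_of_lt) (i + 1) j (by omega) hj
  · intro hle
    by_contra hn
    have : ¬ SK[j] < SK[i + 1]'(h) := not_lt_of_ge hle
    rw [pairwise_lt_getElem_iff SK hpw j (i + 1) hj h] at this
    omega

theorem kf_max (xs SK : List Int) (hpw : SK.Pairwise (· < ·))
    (hmem : ∀ e ∈ xs, e ∈ SK) (hne : 0 < SK.length) :
    gtCnt xs (SK[SK.length - 1]'(by omega)) = 0 := by
  unfold gtCnt
  norm_num
  intro e he
  obtain ⟨j, hj, rfl⟩ := List.mem_iff_getElem.1 (hmem e he)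
  have hn : ¬ (SK[SK.length - 1]'(by omega) < SK[j]) := by
    rw [pairwise_lt_getElem_iff SK hpw (SK.length - 1) j (by omega) hj]
    omega
  exact not_lt.mp hn

-- loop-invariant state after having processed all indices ≥ i
def csAt (SK xs : List Int) (i : Nat) : List (Int × Int) :=
  (SK.take i).map (fun k => (k, keyCnt xs k)) ++ (SK.drop i).map (fun k => (k, geCnt xs k))

def valAt (SK xs : List Int) (i : Nat) (k : Int) : Int :=
  if k ∈ SK.drop i then gtCnt xs k else keyCnt xs k

def dAt (K SK xs : List Int) (i : Nat) : List (Int × Int) :=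
  K.map (fun k => (k, valAt SK xs i k))

theorem csAt_length (SK xs : List Int) (i : Nat) : (csAt SK xs i).length = SK.length := by
  simp [csAt]; omega

theorem csAt_getElem (SK xs : List Int) (i j : Nat) (hj : j < SK.length) :
    (csAt SK xs i)[j]'(by rw [csAt_length]; exact hj)
      = (SK[j], if i ≤ j then geCnt xs SK[j] else keyCnt xs SK[j]) := by
  by_cases h : j < i
  · have hlen : j < ((SK.take i).map (fun k => (k, keyCnt xs k))).length := by
      simp [List.length_take]; omega
    simp only [csAt]
    rw [List.getElem_append_left hlen]
    simp [List.getElem_take, if_neg (by omega : ¬ i ≤ j)]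
  · have hlen : ((SK.take i).map (fun k => (k, keyCnt xs k))).length ≤ j := by
      simp [List.length_take]; omega
    simp only [csAt]
    rw [List.getElem_append_right hlen]
    have hti : ((SK.take i).map (fun k => (k, keyCnt xs k))).length = min i SK.length := by simp
    simp only [List.getElem_map, List.getElem_drop]
    have hidx2 : i + (j - min i SK.length) = j := by omega
    simp [hidx2, if_pos (by omega : i ≤ j)]

theorem not_mem_drop_succ_self (SK : List Int) (hnd : SK.Nodup) (i : Nat) (h : i < SK.length) :
    SK[i] ∉ SK.drop (i + 1) := by
  intro hmem
  obtain ⟨j, hj, hje⟩ := List.mem_iff_getElem.1 hmem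
  rw [List.getElem_drop] at hje
  have := (List.Nodup.getElem_inj_iff hnd).1 hje.symm
  omega

theorem drop_cons_self (SK : List Int) (i : Nat) (h : i < SK.length) :
    SK.drop i = SK[i] :: SK.drop (i + 1) := List.drop_eq_getElem_cons h

theorem aStep_eq (xs K SK : List Int) (i : Nat)
    (hpw : SK.Pairwise (· < ·)) (hnd : SK.Nodup)
    (hmem : ∀ e ∈ xs, e ∈ SK) (hKS : ∀ k, k ∈ K ↔ k ∈ SK)
    (h : i + 1 < SK.length) :
    aStep (csAt SK xs (i + 1), PySem.Dict.mk (dAt K SK xs (i + 1))) (i : Int)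
      = (csAt SK xs i, PySem.Dict.mk (dAt K SK xs i)) := by
  have hi : i < SK.length := by omega
  have hgt_ge : gtCnt xs (SK[i]'hi) = geCnt xs (SK[i + 1]'h) := kf_gt_eq_ge xs SK hpw hmem i h
  have hsplit := geCnt_split xs (SK[i]'hi)
  -- reads from C_sorted before the in-place update
  have hget1 : PySem.List.pyGetD (csAt SK xs (i + 1)) (i : Int) (0, 0)
      = (SK[i]'hi, keyCnt xs (SK[i]'hi)) := by
    rw [PySem.List.pyGetD_eq_getElem _ _ (by omega)
      (by rw [csAt_length]; exact_mod_cast hi)]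
    simp only [Int.toNat_natCast]
    rw [csAt_getElem SK xs (i + 1) i hi]
    simp [if_neg (by omega : ¬ i + 1 ≤ i)]
  have hget2 : PySem.List.pyGetD (csAt SK xs (i + 1)) ((i : Int) + 1) (0, 0)
      = (SK[i + 1]'h, geCnt xs (SK[i + 1]'h)) := by
    have : ((i : Int) + 1) = ((i + 1 : Nat) : Int) := by push_cast; ring
    rw [this, PySem.List.pyGetD_eq_getElem _ _ (by omega)
      (by rw [csAt_length]; exact_mod_cast h)]
    simp only [Int.toNat_natCast]
    rw [csAt_getElem SK xs (i + 1) (i + 1) h]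
    simp
  have hKi : SK[i]'hi ∈ K := (hKS _).2 (List.getElem_mem hi)
  have hnotdrop : SK[i]'hi ∉ SK.drop (i + 1) := not_mem_drop_succ_self SK hnd i hi
  have hval1 : valAt SK xs (i + 1) (SK[i]'hi) = keyCnt xs (SK[i]'hi) := by
    simp [valAt, hnotdrop]
  -- the in-place list update C_sorted[i][1] += C_sorted[i+1][1]
  have hset : pySet (csAt SK xs (i + 1)) (i : Int)
      (SK[i]'hi, keyCnt xs (SK[i]'hi) + geCnt xs (SK[i + 1]'h)) = csAt SK xs i := by
    unfold pySet
    rw [csAt_length]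
    have hidx : PySem.List.pyIdx? SK.length (i : Int) = some i := by
      simp [PySem.List.pyIdx?, (by exact_mod_cast hi : (i : Int) < (SK.length : Int))]
    rw [hidx]
    apply List.ext_getElem
    · simp [csAt_length]
    · intro j hj1 hj2
      have hjlen : j < SK.length := by rw [csAt_length] at hj2; exact hj2
      rw [List.getElem_set]
      by_cases hje : i = j
      · subst hje
        rw [if_pos rfl, csAt_getElem SK xs i i hjlen]
        simp only [if_pos (le_refl i), Prod.mk.injEq]
        exact ⟨trivial, by omega⟩
      · rw [if_neg hje, csAt_getElem SK xs (i + 1) j hjlen, csAt_getElem SK xs i j hjlen]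
        have hiff : (i + 1 ≤ j) ↔ (i ≤ j) := by omega
        simp only [hiff]
  have hget3 : PySem.List.pyGetD (csAt SK xs i) (i : Int) (0, 0)
      = (SK[i]'hi, geCnt xs (SK[i]'hi)) := by
    rw [PySem.List.pyGetD_eq_getElem _ _ (by omega)
      (by rw [csAt_length]; exact_mod_cast hi)]
    simp only [Int.toNat_natCast]
    rw [csAt_getElem SK xs i i hi]
    simp
  have hgd1 : (PySem.Dict.mk (dAt K SK xs (i + 1))).getD (SK[i]'hi) 0
      = keyCnt xs (SK[i]'hi) := by
    rw [dAt, getD_mk_map K _ _ hKi, hval1]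
  have hd1 : (PySem.Dict.mk (dAt K SK xs (i + 1))).insert (SK[i]'hi)
        (keyCnt xs (SK[i]'hi) * -1)
      = PySem.Dict.mk (K.map (fun k' => (k',
          if k' = SK[i]'hi then keyCnt xs (SK[i]'hi) * -1 else valAt SK xs (i + 1) k'))) := by
    rw [dAt, insert_mk_map K _ _ _ hKi]
  have hgd2 : (PySem.Dict.mk (K.map (fun k' => (k',
          if k' = SK[i]'hi then keyCnt xs (SK[i]'hi) * -1 else valAt SK xs (i + 1) k')))).getD
        (SK[i]'hi) 0 = keyCnt xs (SK[i]'hi) * -1 := by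
    rw [getD_mk_map K _ _ hKi]
    simp
  have hd2 : (PySem.Dict.mk (K.map (fun k' => (k',
          if k' = SK[i]'hi then keyCnt xs (SK[i]'hi) * -1 else valAt SK xs (i + 1) k')))).insert
        (SK[i]'hi) (keyCnt xs (SK[i]'hi) * -1 + geCnt xs (SK[i]'hi))
      = PySem.Dict.mk (dAt K SK xs i) := by
    rw [insert_mk_map K _ _ _ hKi]
    congr 1
    apply List.map_congr_left
    intro k' hk'
    by_cases he : k' = SK[i]'hi
    · subst he
      have hmemdrop : (SK[i]'hi) ∈ SK.drop i := by
        rw [drop_cons_self SK i hi]; exact List.mem_cons_self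
      simp only [if_pos rfl, Prod.mk.injEq, true_and, if_true, eq_self_iff_true]
      rw [valAt, if_pos hmemdrop]
      omega
    · simp only [if_neg he, Prod.mk.injEq, true_and, valAt, drop_cons_self SK i hi,
        List.mem_cons]
      simp [he]
  simp only [aStep, hget1, hget2]
  rw [Prod.mk.injEq]
  constructor
  · exact hset
  · rw [hgd1, hd1, hset, hget3, hgd2, hd2]

theorem loop_inv (xs K SK : List Int)
    (hpw : SK.Pairwise (· < ·)) (hnd : SK.Nodup)
    (hmem : ∀ e ∈ xs, e ∈ SK) (hKS : ∀ k, k ∈ K ↔ k ∈ SK) :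
    ∀ (i : Nat), i < SK.length →
    (PySem.List.pyRange ((i : Int) - 1) (-1) (-1)).foldl aStep
        (csAt SK xs i, PySem.Dict.mk (dAt K SK xs i))
      = (csAt SK xs 0, PySem.Dict.mk (dAt K SK xs 0)) := by
  intro i
  induction i with
  | zero => intro _; norm_num [pyRange_down_nil]
  | succ i ih =>
    intro hlt
    have hc : ((i + 1 : Nat) : Int) - 1 = (i : Int) := by push_cast; ring
    rw [hc, pyRange_down_cons (i : Int) (by omega), List.foldl_cons,
        aStep_eq xs K SK i hpw hnd hmem hKS hlt]
    exact ih (by omega)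

theorem a_side (A : List (Int × Int)) (hA : A ≠ []) :
    counting_more A = (PySem.Set.ofList (A.map Prod.snd)).map
      (fun k => (k, gtCnt (A.map Prod.snd) k)) := by
  set xs := A.map Prod.snd with hxsdef
  have hxsne : xs ≠ [] := by simpa [hxsdef] using hA
  set K : List Int := PySem.Set.ofList xs with hKdef
  set SK : List Int := PySem.List.sorted K (fun k => k) with hSKdef
  have hndK : K.Nodup := PySem.Set.nodup_ofList xs
  have hperm : SK.Perm K := PySem.List.sorted_perm K _ false
  have hndSK : SK.Nodup := hperm.nodup_iff.2 hndK
  have hpw : SK.Pairwise (· < ·) := PySem.List.sorted_ofList_pairwise_lt xs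
  have hmem : ∀ e ∈ xs, e ∈ SK := fun e he =>
    hperm.mem_iff.2 ((PySem.Set.mem_ofList xs e).2 he)
  have hKS : ∀ k, k ∈ K ↔ k ∈ SK := fun k => hperm.mem_iff.symm
  have hSKlen : 0 < SK.length := by
    obtain ⟨e, he⟩ := List.exists_mem_of_ne_nil xs hxsne
    exact List.length_pos_of_mem (hmem e he)
  have hm1 : SK.length - 1 < SK.length := by omega
  -- the counter and its items
  have hitems : (PySem.Dict.counter xs).items = K.map (fun k => (k, keyCnt xs k)) :=
    PySem.Dict.items_counter xs
  have hCdicteq : PySem.Dict.counter xs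
      = PySem.Dict.mk (K.map (fun k => (k, keyCnt xs k))) := PySem.Dict.ext hitems
  -- the sorted pair list
  have hinj : ∀ a ∈ K.map (fun k => (k, keyCnt xs k)), ∀ b ∈ K.map (fun k => (k, keyCnt xs k)),
      a.1 = b.1 → a = b := by
    intro a ha b hb hfst
    obtain ⟨k1, _, rfl⟩ := List.mem_map.1 ha
    obtain ⟨k2, _, rfl⟩ := List.mem_map.1 hb
    simp at hfst
    subst hfst
    rfl
  have hCs : PySem.List.sorted2 ((PySem.Dict.counter xs).items) Prod.fst Prod.snd
      = SK.map (fun k => (k, keyCnt xs k)) := by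
    rw [hitems, sorted2_eq_sorted_fst _ hinj]
    apply PySem.List.sorted_eq_of_perm_of_pairwise_lt
    · exact hperm.map _
    · rw [List.pairwise_map]
      exact hpw
  -- the last element fetched by C_sorted[-1]
  have hlast : PySem.List.pyGet? (SK.map (fun k => (k, keyCnt xs k))) (-1)
      = some (SK[SK.length - 1]'hm1, keyCnt xs (SK[SK.length - 1]'hm1)) := by
    have hlen : (SK.map (fun k => (k, keyCnt xs k))).length = SK.length := by simp
    rw [PySem.List.pyGet?, hlen, PySem.List.pyIdx?]
    rw [if_neg (by omega), if_pos (by omega)]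
    have : SK.length - (-(-1 : Int)).toNat = SK.length - 1 := by norm_num
    rw [this]
    simp [List.getElem?_eq_getElem (by simp [hm1] : SK.length - 1 < (SK.map (fun k => (k, keyCnt xs k))).length)]
  -- initial dict after C[C_sorted[-1][0]] = 0
  have hins0 : (PySem.Dict.mk (K.map (fun k => (k, keyCnt xs k)))).insert
        (SK[SK.length - 1]'hm1) 0 = PySem.Dict.mk (dAt K SK xs (SK.length - 1)) := by
    rw [insert_mk_map K _ _ _ ((hKS _).2 (List.getElem_mem hm1))]
    congr 1
    apply List.map_congr_left
    intro k' hk'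
    have hdrop : SK.drop (SK.length - 1) = [SK[SK.length - 1]'hm1] := by
      rw [drop_cons_self SK (SK.length - 1) hm1]
      simp [show SK.length - 1 + 1 = SK.length by omega]
    by_cases he : k' = SK[SK.length - 1]'hm1
    · subst he
      simp [valAt, hdrop, kf_max xs SK hpw hmem hSKlen]
    · simp [he, valAt, hdrop]
  -- initial C_sorted equals the invariant state at phase length-1
  have hcs0 : SK.map (fun k => (k, keyCnt xs k)) = csAt SK xs (SK.length - 1) := by
    rw [csAt]
    conv_lhs => rw [← List.take_append_drop (SK.length - 1) SK]
    rw [List.map_append]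
    congr 1
    rw [drop_cons_self SK (SK.length - 1) hm1]
    rw [show SK.length - 1 + 1 = SK.length by omega, List.drop_length]
    simp only [List.map_cons, List.map_nil, List.cons.injEq, and_true, Prod.mk.injEq, true_and]
    have := geCnt_split xs (SK[SK.length - 1]'hm1)
    have := kf_max xs SK hpw hmem hSKlen
    omega
  -- run the loop
  have hlen2 : PySem.List.len (SK.map (fun k => (k, keyCnt xs k))) - 2
      = ((SK.length - 1 : Nat) : Int) - 1 := by
    simp only [PySem.List.len, List.length_map]
    omega
  simp only [counting_more, a_fold_eq_counter A, ← hxsdef, hCs, hlast, hlen2]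
  rw [hCdicteq, hins0, hcs0, loop_inv xs K SK hpw hndSK hmem hKS (SK.length - 1) hm1]
  -- the final dict
  rw [dAt]
  apply List.map_congr_left
  intro k hk
  simp [valAt, (hKS k).1 hk]

theorem b_side (A : List (Int × Int)) :
    counting_more_alt A = (PySem.Set.ofList (A.map Prod.snd)).map
      (fun k => (k, gtCnt (A.map Prod.snd) k)) := by
  have hSpw : (PySem.List.sorted (A.map Prod.snd) (fun e => e)).Pairwise (· ≤ ·) := by
    simpa using PySem.List.sorted_pairwise (A.map Prod.snd) (fun e => e)
  have hf : ∀ k : Int,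
      PySem.List.len (PySem.List.sorted (A.map Prod.snd) (fun e => e))
        - pyBisectRight (PySem.List.sorted (A.map Prod.snd) (fun e => e)) k 0
            (PySem.List.len (PySem.List.sorted (A.map Prod.snd) (fun e => e)))
      = gtCnt (A.map Prod.snd) k := by
    intro k
    have h1 := bis_top (PySem.List.sorted (A.map Prod.snd) (fun e => e)) k hSpw
    have h2 : (PySem.List.sorted (A.map Prod.snd) (fun e => e)).countP
          (fun e => decide (k < e))
        = (A.map Prod.snd).countP (fun e => decide (k < e)) :=
      (PySem.List.sorted_perm (A.map Prod.snd) _ false).countP_eq _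
    rw [PySem.List.len, h1, h2, gtCnt]
  have hfold : A.foldl (fun res p =>
        if res.contains p.2 then res
        else res.insert p.2
          (PySem.List.len (PySem.List.sorted (A.map Prod.snd) (fun e => e))
            - pyBisectRight (PySem.List.sorted (A.map Prod.snd) (fun e => e)) p.2 0
                (PySem.List.len (PySem.List.sorted (A.map Prod.snd) (fun e => e)))))
        PySem.Dict.empty
      = (A.map Prod.snd).foldl (fun res e =>
        if res.contains e then res
        else res.insert e
          (PySem.List.len (PySem.List.sorted (A.map Prod.snd) (fun e => e))
            - pyBisectRight (PySem.List.sorted (A.map Prod.snd) (fun e => e)) e 0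
                (PySem.List.len (PySem.List.sorted (A.map Prod.snd) (fun e => e)))))
        PySem.Dict.empty :=
    (List.foldl_map (f := Prod.snd) (l := A) (init := (PySem.Dict.empty : PySem.Dict Int Int))
      (g := fun res e =>
        if res.contains e then res
        else res.insert e
          (PySem.List.len (PySem.List.sorted (A.map Prod.snd) (fun e => e))
            - pyBisectRight (PySem.List.sorted (A.map Prod.snd) (fun e => e)) e 0
                (PySem.List.len (PySem.List.sorted (A.map Prod.snd) (fun e => e)))))).symm
  have hb := b_fold (fun k =>
      PySem.List.len (PySem.List.sorted (A.map Prod.snd) (fun e => e))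
        - pyBisectRight (PySem.List.sorted (A.map Prod.snd) (fun e => e)) k 0
            (PySem.List.len (PySem.List.sorted (A.map Prod.snd) (fun e => e))))
    (A.map Prod.snd) []
  simp only [List.map_nil] at hb
  simp only [counting_more_alt]
  rw [hfold, show (PySem.Dict.empty : PySem.Dict Int Int) = PySem.Dict.mk [] from rfl, hb]
  simp only [PySem.Set.ofList, PySem.Set.empty]
  apply List.map_congr_left
  intro k _
  rw [hf k]

theorem counting_more_eq (A : List (Int × Int)) (hA : A ≠ []) :
    counting_more A = counting_more_alt A := by
  rw [a_side A hA, b_side A]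

-- ===== VERDICT (by name: the statement is the Claim_ definition above) =====
theorem counting_more_spec : Claim_equal_counting_more := by
  intro A _ hpre
  unfold Spec_counting_more
  exact counting_more_eq A hpre
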